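-- pv_equiv track=rewrite | github.com/vitalyruhl/ConfigurationsManager | tools/build_feature_matrix.py | find_env_block
-- ===== SOURCE A (Python) =====
-- from typing import Dict, List, Tuple
--
-- def find_env_block(lines: List[str], env_name: str) -> Tuple[int, int]:
--     start = end = -1
--     hdr = f'[env:{env_name}]'
--     for i, ln in enumerate(lines):
--         s = ln.strip()
--         if s.startswith('[') and s.endswith(']'):
--             if start >= 0:
--                 end = i
--                 break
--             if s == hdr:
--                 start = i
--     if start >= 0 and end < 0:
--         end = len(lines)
--     return start, end
-- ===== SOURCE B (Python) =====
-- from typing import Dict, List, Tuple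
--
-- def find_env_block(lines: List[str], env_name: str) -> Tuple[int, int]:
--     hdr = f'[env:{env_name}]'
--     # build, once, an index of every section-header line: (line index, stripped text)
--     headers = [(i, ln.strip()) for i, ln in enumerate(lines)
--                if ln.strip().startswith('[') and ln.strip().endswith(']')]
--     # pair each header with the start of the next section (len(lines) after the last)
--     for (i, s), (j, _) in zip(headers, headers[1:] + [(len(lines), '')]):
--         if s == hdr:
--             return (i, j)
--     return (-1, -1)
-- ===== Notes on version B (the rewrite author's own statement) =====
-- stated objective: alternative
-- what changed: Replaced A's stateful scan (start/end tracked together, break, post-loop end=len fixup) by an index data structure: one comprehension collects every section-header line's (index, stripped text), each header is zipped with its successor's index (len(lines) for the last), and the answer is read off the pair whose text equals the [env:...] header, (-1,-1) if absent.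
import Mathlib
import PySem

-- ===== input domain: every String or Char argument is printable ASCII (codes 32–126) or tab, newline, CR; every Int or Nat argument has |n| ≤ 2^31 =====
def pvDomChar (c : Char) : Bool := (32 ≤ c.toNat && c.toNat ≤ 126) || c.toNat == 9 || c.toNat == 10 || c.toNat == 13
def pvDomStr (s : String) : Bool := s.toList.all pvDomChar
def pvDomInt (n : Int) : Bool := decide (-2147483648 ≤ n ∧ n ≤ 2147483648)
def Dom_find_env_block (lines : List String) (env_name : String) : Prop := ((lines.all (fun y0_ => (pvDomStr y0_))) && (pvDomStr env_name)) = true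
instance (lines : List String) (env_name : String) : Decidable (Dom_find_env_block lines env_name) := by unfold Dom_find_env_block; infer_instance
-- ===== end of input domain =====

-- B replaces A's stateful scan by a precomputed index of all section-header lines,
-- zipped with the successor's start index; objective: alternative decomposition.


-- ===== PORT A =====
-- the for-loop of A: state (start, fin), i the index of the head of ls; break = return
def pvLoopA (hdr : String) (ls : List String) (i start fin : Int) : Int × Int :=
  match ls with
  | [] => (start, fin)
  | ln :: rest =>
    let s := PySem.Str.strip ln
    if PySem.Str.startswith s "[" && PySem.Str.endswith s "]" then
      if start ≥ 0 then (start, i)          -- end = i; break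
      else if s == hdr then pvLoopA hdr rest (i + 1) i fin
      else pvLoopA hdr rest (i + 1) start fin
    else pvLoopA hdr rest (i + 1) start fin

def find_env_block (lines : List String) (env_name : String) : Int × Int :=
  let hdr := "[env:" ++ env_name ++ "]"
  let p := pvLoopA hdr lines 0 (-1) (-1)
  if p.1 ≥ 0 ∧ p.2 < 0 then (p.1, (lines.length : Int)) else p

-- ===== PORT B =====
-- B's for-loop over the zipped header index: return (i, j) at the matching header
def pvScanB (hdr : String) (zs : List ((Int × String) × (Int × String))) : Int × Int :=
  match zs with
  | [] => (-1, -1)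
  | ((i, s), (j, _)) :: rest => if s == hdr then (i, j) else pvScanB hdr rest

def find_env_block_alt (lines : List String) (env_name : String) : Int × Int :=
  let hdr := "[env:" ++ env_name ++ "]"
  -- headers = [(i, ln.strip()) for i, ln in enumerate(lines) if ln.strip().startswith('[') and ln.strip().endswith(']')]
  let headers := ((PySem.List.enumerate lines).filter
      (fun p => PySem.Str.startswith (PySem.Str.strip p.2) "[" &&
                PySem.Str.endswith (PySem.Str.strip p.2) "]")).map
      (fun p => (p.1, PySem.Str.strip p.2))
  -- zip(headers, headers[1:] + [(len(lines), '')])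
  pvScanB hdr (headers.zip (PySem.List.slice headers (some 1) none ++ [((lines.length : Int), "")]))

-- ===== PRECONDITION & SPEC =====
def Spec_find_env_block (lines : List String) (env_name : String) (out : Int × Int) : Prop := out = find_env_block_alt lines env_name
instance (lines : List String) (env_name : String) (out : Int × Int) : Decidable (Spec_find_env_block lines env_name out) := by unfold Spec_find_env_block; infer_instance

-- ===== CLAIM (what is proved, stated in full; the proofs are below) =====
def Claim_equal_find_env_block : Prop := ∀ (lines : List String) (env_name : String), Dom_find_env_block lines env_name → Spec_find_env_block lines env_name (find_env_block lines env_name)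

-- ===== LEMMAS AND PROOFS =====

-- proof-only reference functions: first index whose stripped line equals hdr (else -1),
-- and first index (from i) of a '[…]' line (else i + length)
def pvFindHdr (hdr : String) (ls : List String) (i : Int) : Int :=
  match ls with
  | [] => -1
  | ln :: rest => if PySem.Str.strip ln == hdr then i else pvFindHdr hdr rest (i + 1)

def pvFindBr (ls : List String) (i : Int) : Int :=
  match ls with
  | [] => i
  | ln :: rest =>
    let s := PySem.Str.strip ln
    if PySem.Str.startswith s "[" && PySem.Str.endswith s "]" then i
    else pvFindBr rest (i + 1)

-- the common normal form both ports are reduced to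
def pvSpecFn (hdr : String) (ls : List String) (i : Int) : Int × Int :=
  if pvFindHdr hdr ls i = -1 then (-1, -1)
  else (pvFindHdr hdr ls i,
        pvFindBr (ls.drop (pvFindHdr hdr ls i + 1 - i).toNat) (pvFindHdr hdr ls i + 1))

-- recursive form of B's header index, counter i
def pvHAux (i : Int) : List String → List (Int × String)
  | [] => []
  | ln :: rest =>
    let s := PySem.Str.strip ln
    if PySem.Str.startswith s "[" && PySem.Str.endswith s "]"
    then (i, s) :: pvHAux (i + 1) rest else pvHAux (i + 1) rest

-- hdr = "[env:…]" itself passes the bracket test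
lemma pv_hdr_br (n : String) :
    (PySem.Str.startswith ("[env:" ++ n ++ "]") "[" && PySem.Str.endswith ("[env:" ++ n ++ "]") "]") = true := by
  simp [PySem.Chars.startswith_iff, PySem.Chars.endswith_iff]
  exact ⟨'[' :: 'e' :: 'n' :: 'v' :: ':' :: n.toList, by simp⟩

-- pass 1 returns -1 or an index ≥ its starting counter
lemma pvFindHdr_cases (hdr : String) : ∀ (ls : List String) (i : Int),
    pvFindHdr hdr ls i = -1 ∨ i ≤ pvFindHdr hdr ls i := by
  intro ls
  induction ls with
  | nil => intro i; left; rfl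
  | cons ln rest ih =>
    intro i
    by_cases h : (PySem.Str.strip ln == hdr) = true
    · right; simp [pvFindHdr, h]
    · have := ih (i + 1)
      simp only [pvFindHdr, h, if_false, Bool.false_eq_true]
      omega

-- stepping the normal form past a non-matching head line
lemma pvSpecFn_step (hdr ln : String) (rest : List String) (i : Int) (hi : 0 ≤ i)
    (hh : ¬ (PySem.Str.strip ln == hdr) = true) :
    pvSpecFn hdr (ln :: rest) i = pvSpecFn hdr rest (i + 1) := by
  have hfh : pvFindHdr hdr (ln :: rest) i = pvFindHdr hdr rest (i + 1) := by
    simp only [pvFindHdr, if_neg hh]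
  unfold pvSpecFn
  rw [hfh]
  rcases pvFindHdr_cases hdr rest (i + 1) with hc | hc
  · simp [hc]
  · have hne : ¬ (pvFindHdr hdr rest (i + 1) = -1) := by omega
    rw [if_neg hne, if_neg hne]
    have h2 : (pvFindHdr hdr rest (i + 1) + 1 - i).toNat
        = (pvFindHdr hdr rest (i + 1) + 1 - (i + 1)).toNat + 1 := by omega
    rw [h2, List.drop_succ_cons]

-- the normal form at a matching head line (i ≥ 0)
lemma pvSpecFn_hit (hdr ln : String) (rest : List String) (i : Int) (hi : 0 ≤ i)
    (hh : (PySem.Str.strip ln == hdr) = true) :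
    pvSpecFn hdr (ln :: rest) i = (i, pvFindBr rest (i + 1)) := by
  have hfh : pvFindHdr hdr (ln :: rest) i = i := by simp only [pvFindHdr, if_pos hh]
  have hne : ¬ (i = -1) := by omega
  have h1 : (i + 1 - i).toNat = 1 := by omega
  unfold pvSpecFn
  rw [hfh, if_neg hne, h1, List.drop_succ_cons, List.drop_zero]

-- ===== A SIDE =====

-- once start is found, A's remaining loop + post-fixup computes pvFindBr
lemma pv_loopA_found (hdr : String) : ∀ (ls : List String) (i s : Int), 0 ≤ s → 0 ≤ i →
    (if (pvLoopA hdr ls i s (-1)).1 ≥ 0 ∧ (pvLoopA hdr ls i s (-1)).2 < 0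
     then ((pvLoopA hdr ls i s (-1)).1, i + (ls.length : Int)) else pvLoopA hdr ls i s (-1))
    = (s, pvFindBr ls i) := by
  intro ls
  induction ls with
  | nil => intro i s hs hi; simp [pvLoopA, pvFindBr, hs]
  | cons ln rest ih =>
    intro i s hs hi
    by_cases hb : (PySem.Str.startswith (PySem.Str.strip ln) "[" && PySem.Str.endswith (PySem.Str.strip ln) "]") = true
    · simp only [pvLoopA, pvFindBr, hb, ge_iff_le, hs, if_pos]
      simp; omega
    · simp only [pvLoopA, pvFindBr, hb, if_false, Bool.false_eq_true]
      have := ih (i + 1) s hs (by omega)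
      simp only [List.length_cons]
      have harith : i + ((rest.length : Int) + 1) = (i + 1) + (rest.length : Int) := by omega
      push_cast
      rw [harith]
      exact this

-- the whole of A (searching phase) computes the normal form
lemma pv_loopA_main (hdr : String)
    (hbr : (PySem.Str.startswith hdr "[" && PySem.Str.endswith hdr "]") = true) :
    ∀ (ls : List String) (i : Int), 0 ≤ i →
    (if (pvLoopA hdr ls i (-1) (-1)).1 ≥ 0 ∧ (pvLoopA hdr ls i (-1) (-1)).2 < 0
     then ((pvLoopA hdr ls i (-1) (-1)).1, i + (ls.length : Int)) else pvLoopA hdr ls i (-1) (-1))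
    = pvSpecFn hdr ls i := by
  intro ls
  induction ls with
  | nil => intro i hi; simp [pvLoopA, pvFindHdr, pvSpecFn]
  | cons ln rest ih =>
    intro i hi
    by_cases hh : (PySem.Str.strip ln == hdr) = true
    · have hseq : PySem.Str.strip ln = hdr := eq_of_beq hh
      have hfound := pv_loopA_found hdr rest (i + 1) i hi (by omega)
      have h1 : ¬ ((-1 : Int) ≥ 0) := by omega
      rw [pvSpecFn_hit hdr ln rest i hi hh]
      simp only [pvLoopA, hseq, hbr, beq_self_eq_true, ite_true, h1, ite_false,
        List.length_cons]
      push_cast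
      rw [show i + ((rest.length : Int) + 1) = (i + 1) + (rest.length : Int) from by ring]
      exact hfound
    · have hrec : pvLoopA hdr (ln :: rest) i (-1) (-1) = pvLoopA hdr rest (i + 1) (-1) (-1) := by
        simp only [pvLoopA]
        by_cases hb : (PySem.Str.startswith (PySem.Str.strip ln) "[" && PySem.Str.endswith (PySem.Str.strip ln) "]") = true
        · rw [if_pos hb, if_neg (show ¬ ((-1 : Int) ≥ 0) from by omega), if_neg hh]
        · rw [if_neg hb]
      rw [hrec, pvSpecFn_step hdr ln rest i hi hh, List.length_cons]
      have hih := ih (i + 1) (by omega)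
      push_cast
      rw [show i + ((rest.length : Int) + 1) = (i + 1) + (rest.length : Int) from by ring]
      exact hih

-- ===== B SIDE =====

-- the port's filter/map over enumerate is pvHAux
lemma pvH_eq : ∀ (ls : List String) (i : Int),
    ((PySem.List.enumerate ls i).filter
      (fun p => PySem.Str.startswith (PySem.Str.strip p.2) "[" &&
                PySem.Str.endswith (PySem.Str.strip p.2) "]")).map
      (fun p => (p.1, PySem.Str.strip p.2)) = pvHAux i ls := by
  intro ls
  induction ls with
  | nil => intro i; simp [PySem.List.enumerate_nil, pvHAux]
  | cons ln rest ih =>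
    intro i
    rw [PySem.List.enumerate_cons]
    by_cases hb : (PySem.Str.startswith (PySem.Str.strip ln) "[" && PySem.Str.endswith (PySem.Str.strip ln) "]") = true
    · simp only [List.filter_cons, List.map_cons, pvHAux, hb, if_true, ih]
    · simp only [List.filter_cons, pvHAux, hb, if_false, Bool.false_eq_true, ih]

-- the first header index from counter i (defaulting to i + length) is pvFindBr
lemma pvHAux_first : ∀ (ls : List String) (i : Int),
    ((pvHAux i ls).headD ((i + (ls.length : Int), ""))).1 = pvFindBr ls i := by
  intro ls
  induction ls with
  | nil => intro i; simp [pvHAux, pvFindBr]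
  | cons ln rest ih =>
    intro i
    simp only [pvHAux, pvFindBr]
    by_cases hb : (PySem.Str.startswith (PySem.Str.strip ln) "[" && PySem.Str.endswith (PySem.Str.strip ln) "]") = true
    · rw [if_pos hb, if_pos hb, List.headD_cons]
    · rw [if_neg hb, if_neg hb]
      have := ih (i + 1)
      simp only [List.length_cons]
      push_cast
      rw [show i + ((rest.length : Int) + 1) = (i + 1) + (rest.length : Int) from by ring]
      exact this

-- B's scan over the zipped index computes the normal form
lemma pv_scanB_main (hdr : String)
    (hbr : (PySem.Str.startswith hdr "[" && PySem.Str.endswith hdr "]") = true) :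
    ∀ (ls : List String) (i : Int), 0 ≤ i →
    pvScanB hdr ((pvHAux i ls).zip ((pvHAux i ls).tail ++ [((i + (ls.length : Int)), "")]))
    = pvSpecFn hdr ls i := by
  intro ls
  induction ls with
  | nil => intro i hi; simp [pvHAux, pvScanB, pvSpecFn, pvFindHdr]
  | cons ln rest ih =>
    intro i hi
    have harith : i + (((ln :: rest).length : Int)) = (i + 1) + (rest.length : Int) := by
      simp only [List.length_cons]; push_cast; ring
    by_cases hb : (PySem.Str.startswith (PySem.Str.strip ln) "[" && PySem.Str.endswith (PySem.Str.strip ln) "]") = true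
    · -- head line is a section header: it enters the index
      have hH : pvHAux i (ln :: rest) = (i, PySem.Str.strip ln) :: pvHAux (i + 1) rest := by
        simp only [pvHAux]; rw [if_pos hb]
      rw [hH, harith, List.tail_cons]
      have hfirst := pvHAux_first rest (i + 1)
      by_cases hh : (PySem.Str.strip ln == hdr) = true
      · -- it is THE header: B returns (i, successor)
        rw [pvSpecFn_hit hdr ln rest i hi hh]
        cases ht : pvHAux (i + 1) rest with
        | nil =>
          rw [ht] at hfirst
          simp only [List.nil_append, List.zip_cons_cons, List.zip_nil_left,
            pvScanB, if_pos hh]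
          simp only [List.headD_nil] at hfirst
          rw [← hfirst]
        | cons h t =>
          obtain ⟨j, str⟩ := h
          rw [ht] at hfirst
          simp only [List.cons_append, List.zip_cons_cons, pvScanB, if_pos hh]
          simp only [List.headD_cons] at hfirst
          rw [← hfirst]
      · -- a different header: B skips it; the remaining zip is B's expression for rest
        rw [pvSpecFn_step hdr ln rest i hi hh, ← ih (i + 1) (by omega)]
        cases ht : pvHAux (i + 1) rest with
        | nil =>
          simp only [List.nil_append, List.zip_cons_cons, List.zip_nil_left,
            pvScanB, if_neg hh, List.tail_nil]
        | cons h t =>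
          obtain ⟨j, str⟩ := h
          simp only [List.cons_append, List.zip_cons_cons, pvScanB, if_neg hh,
            List.tail_cons]
    · -- not a header line: index unchanged; also strip ln ≠ hdr since hdr is bracketed
      have hh : ¬ (PySem.Str.strip ln == hdr) = true := by
        intro hc
        exact hb (by rw [eq_of_beq hc]; exact hbr)
      have hH : pvHAux i (ln :: rest) = pvHAux (i + 1) rest := by
        simp only [pvHAux]; rw [if_neg hb]
      rw [pvSpecFn_step hdr ln rest i hi hh, ← ih (i + 1) (by omega), hH, harith]

-- ===== VERDICT (by name: the statement is the Claim_ definition above) =====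
theorem find_env_block_spec : Claim_equal_find_env_block := by
  intro lines env_name _
  unfold Spec_find_env_block find_env_block find_env_block_alt
  have hbr := pv_hdr_br env_name
  have hA := pv_loopA_main ("[env:" ++ env_name ++ "]") hbr lines 0 le_rfl
  have hB := pv_scanB_main ("[env:" ++ env_name ++ "]") hbr lines 0 le_rfl
  simp only [zero_add] at hA hB
  simp only [PySem.List.slice_from_one, pvH_eq]
  rw [hA, hB]
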